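-- pv_equiv track=rewrite | github.com/hikawi/gem-hunter | src/solver.py | check
-- ===== SOURCE A (Python) =====
-- def check(clause:list[int], model:list[int]):
--     clause_symbol=set()
--     for i in clause:
--         clause_symbol.add(abs(i))
--     model_symbol=set()
--     for i in model:
--         model_symbol.add(abs(i))
--     if(len(model_symbol)<len(clause_symbol)):
--         return True
--     for i in clause_symbol:
--         if  i not in model_symbol:
--             return True
--     for i in clause:
--         if i in model:
--             return True
--     return False
-- ===== SOURCE B (Python) =====
-- def check(clause: list[int], model: list[int]):
--     model_symbol = {abs(i) for i in model}
--     model_set = set(model)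
--     return any(abs(i) not in model_symbol or i in model_set for i in clause)
-- ===== Notes on version B (the rewrite author's own statement) =====
-- stated objective: simpler
-- what changed: Replaces A's three sequential passes (dedup both sides into symbol sets, a redundant length shortcut, a symbol scan, then a raw-literal loop doing an O(m) 'i in model' list scan per literal) by one single pass over the clause testing each literal against two prebuilt model sets.
import Mathlib
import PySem

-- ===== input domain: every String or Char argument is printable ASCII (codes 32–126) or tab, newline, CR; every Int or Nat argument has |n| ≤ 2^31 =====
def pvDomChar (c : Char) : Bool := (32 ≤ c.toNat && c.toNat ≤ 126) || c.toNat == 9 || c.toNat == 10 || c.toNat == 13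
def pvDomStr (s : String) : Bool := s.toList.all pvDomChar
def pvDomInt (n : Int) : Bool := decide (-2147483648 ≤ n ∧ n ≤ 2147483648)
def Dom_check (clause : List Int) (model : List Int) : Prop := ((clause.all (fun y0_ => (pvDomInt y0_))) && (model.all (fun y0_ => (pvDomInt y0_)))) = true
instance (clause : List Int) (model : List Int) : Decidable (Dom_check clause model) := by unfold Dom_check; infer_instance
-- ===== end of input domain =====

-- ===== PORT A =====
-- One honest line: B fuses A's three passes into a single pass over the clause
-- against two prebuilt model sets (simpler; the length shortcut is subsumed).
def check (clause : List Int) (model : List Int) : Bool :=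
  let clause_symbol := clause.foldl (fun s i => PySem.Set.add s |i|) PySem.Set.empty
  let model_symbol := model.foldl (fun s i => PySem.Set.add s |i|) PySem.Set.empty
  if PySem.Set.len model_symbol < PySem.Set.len clause_symbol then true
  else if clause_symbol.any (fun i => !(PySem.Set.contains model_symbol i)) then true
  else if clause.any (fun i => model.contains i) then true
  else false

-- ===== PORT B =====
def check_alt (clause : List Int) (model : List Int) : Bool :=
  let model_symbol := PySem.Set.ofList (model.map (fun i => |i|))
  let model_set := PySem.Set.ofList model
  clause.any (fun i => !(PySem.Set.contains model_symbol |i|) || PySem.Set.contains model_set i)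

-- ===== PRECONDITION & SPEC =====
def Spec_check (clause : List Int) (model : List Int) (out : Bool) : Prop := out = check_alt clause model
instance (clause : List Int) (model : List Int) (out : Bool) : Decidable (Spec_check clause model out) := by unfold Spec_check; infer_instance

-- ===== CLAIM (what is proved, stated in full; the proofs are below) =====
def Claim_equal_check : Prop := ∀ (clause : List Int) (model : List Int), Dom_check clause model → Spec_check clause model (check clause model)

-- ===== LEMMAS AND PROOFS =====

-- ===== VERDICT (by name: the statement is the Claim_ definition above) =====
-- the ofList-shape of A's hand-built symbol sets
theorem pv_fold_add_eq (xs : List Int) :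
    xs.foldl (fun s i => PySem.Set.add s |i|) PySem.Set.empty
      = PySem.Set.ofList (xs.map (fun i => |i|)) := by
  rw [PySem.Set.ofList_eq_foldl, List.foldl_map]
  rfl

-- pigeonhole: the length shortcut implies a missing symbol
theorem pv_len_lt (clause model : List Int)
    (h : (PySem.Set.ofList (model.map (fun i => |i|))).length
        < (PySem.Set.ofList (clause.map (fun i => |i|))).length) :
    ∃ i ∈ clause, |i| ∉ model.map (fun i => |i|) := by
  by_contra hc
  push_neg at hc
  have hsub : (PySem.Set.ofList (clause.map (fun i => |i|)))
      ⊆ PySem.Set.ofList (model.map (fun i => |i|)) := by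
    intro x hx
    rw [PySem.Set.mem_ofList] at hx ⊢
    obtain ⟨i, hi, rfl⟩ := List.mem_map.mp hx
    exact hc i hi
  exact absurd ((PySem.Set.nodup_ofList _).subperm hsub).length_le (by omega)

theorem check_spec : Claim_equal_check := by
  intro clause model _
  unfold Spec_check check check_alt
  simp only [pv_fold_add_eq, PySem.Set.len]
  by_cases hlen : (PySem.Set.ofList (model.map (fun i => |i|))).length
      < (PySem.Set.ofList (clause.map (fun i => |i|))).length
  · obtain ⟨i, hi, hni⟩ := pv_len_lt clause model hlen
    rw [if_pos (by exact_mod_cast hlen), eq_comm, List.any_eq_true]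
    exact ⟨i, hi, by simp [PySem.Set.contains_iff, hni]⟩
  · rw [if_neg (by exact_mod_cast hlen)]
    by_cases hmiss : ∃ i ∈ clause, |i| ∉ model.map (fun j => |j|)
    · obtain ⟨i, hi, hni⟩ := hmiss
      rw [if_pos, eq_comm, List.any_eq_true]
      · exact ⟨i, hi, by simp [PySem.Set.contains_iff, hni]⟩
      · rw [List.any_eq_true]
        exact ⟨|i|, by simpa [PySem.Set.mem_ofList] using List.mem_map_of_mem hi,
          by simp [PySem.Set.contains_iff, hni]⟩
    · push_neg at hmiss
      rw [if_neg, eq_comm]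
      · by_cases hlit : ∃ i ∈ clause, i ∈ model
        · obtain ⟨i, hi, hm⟩ := hlit
          rw [if_pos, List.any_eq_true]
          · exact ⟨i, hi, by simp [PySem.Set.contains_iff, hm]⟩
          · rw [List.any_eq_true]; exact ⟨i, hi, by simpa using hm⟩
        · push_neg at hlit
          rw [if_neg, List.any_eq_false]
          · intro i hi
            simp [PySem.Set.contains_iff, PySem.Set.mem_ofList, hmiss i hi, hlit i hi]
          · rw [List.any_eq_true]; push_neg; intro i hi; simpa using hlit i hi
      · rw [List.any_eq_true]; push_neg
        intro x hx
        rw [PySem.Set.mem_ofList] at hx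
        obtain ⟨i, hi, rfl⟩ := List.mem_map.mp hx
        simp [PySem.Set.contains_iff, hmiss i hi]
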